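/- GENERATED by farm/mkstatement.py from design/units.tsv (unit `start_decoder.C9`) and the assertions of Vorbis/Spec/StartDecoderA.lean — do not edit.
   THE STATEMENT of the proof unit `start_decoder.C9`: segment C9 of `start_decoder` (34 instructions; entries 0x114724;
   exits 0x113b22,0x114788,0x114bad; ranges 0x114724-0x114782 + 0x114b7f-0x114ba8)
   takes each of its entry assertions to one of its exit assertions (`Vorbis.Spec.StartDecoder.SegC9`), given the contracts of its callees.
   What the names mean: Vorbis/Spec/Basic.lean (the shared hypotheses), Vorbis/Spec/StartDecoderA.lean (the assertions). The theorem to prove: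
   `theorem start_decoder_C9_ok : Vorbis.Spec.start_decoder_C9.Statement`. -/
import Vorbis.Spec.Codebook
import Vorbis.Spec.Leaves
import Vorbis.Spec.Reader
import Vorbis.Spec.StartDecoderA
namespace Vorbis.Spec.start_decoder_C9
open X86 X86.User Asan

/-- The statement of unit `start_decoder.C9`. -/
def Statement : Prop :=
  ∀ (Lay : Layout) (_hLay : Lay.hi = 0x1000000) (μ : Microarch) (_hμ : UserX.MicroOK μ) (u₀ : State)
    (_hcode : HasCodeNat Lay u₀ Vorbis.L.start_decoder.entry Vorbis.Code.code_start_decoder.nat Vorbis.L.start_decoder.size)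
    (_h_compute_accelerated_huffman : ∀ (others : List Obj) (frames : List (Nat × FrameLayout)) (Blk : Block → Prop), Calls Lay μ Vorbis.WayInv (Vorbis.conv u₀) Vorbis.L.compute_accelerated_huffman.entry (Vorbis.Spec.compute_accelerated_huffman.spec others frames Blk))
    (_h_get_bits : ∀ (others : List Obj) (frames : List (Nat × FrameLayout)) (Blk : Block → Prop) (len : Nat), Calls Lay μ Vorbis.WayInv (Vorbis.conv u₀) Vorbis.L.get_bits.entry (Vorbis.Spec.get_bits.spec others frames Blk len))
    (_h_asan_store1_noabort : Asan.SmallCheck Lay μ Vorbis.WayInv (Vorbis.CodeOK u₀) [.rax, .rdx] 1 Vorbis.L.__asan_store1_noabort.entry)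
    (_h_asan_load4_noabort : Asan.SmallCheck Lay μ Vorbis.WayInv (Vorbis.CodeOK u₀) [.rax, .rcx, .rdx] 4 Vorbis.L.__asan_load4_noabort.entry)
    (_h_error : ∀ (others : List Obj) (frames : List (Nat × FrameLayout)), Calls Lay μ Vorbis.WayInv (Vorbis.conv u₀) Vorbis.L.error.entry (Vorbis.Spec.error.spec others frames)),
    Vorbis.Spec.StartDecoder.SegC9 Lay μ u₀

end Vorbis.Spec.start_decoder_C9
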